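-- pv_equiv track=rewrite | github.com/SAKTHIVEL-SEENIVASAN/PYTHON | zoho code praticing/PaliSwap.py | can_be_palindrome_by_one_swap
-- ===== SOURCE A (Python) =====
-- def can_be_palindrome_by_one_swap(s):
--     if s == s[::-1]:
--         return True
--
--     n = len(s)
--     s = list(s)
--
--     for i in range(n):
--         for j in range(i+1, n):
--             s[i], s[j] = s[j], s[i]
--
--             if s == s[::-1]:
--                 return True
--
--             s[i], s[j] = s[j], s[i]  # swap back
--
--     return False
-- ===== SOURCE B (Python) =====
-- def can_be_palindrome_by_one_swap(s):
--     # O(n): collect mismatched symmetric pairs; a single swap can only fix a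
--     # non-palindrome if both swapped positions lie in a mismatched pair (or the
--     # middle), so at most 2 mismatched pairs and <= 10 candidate swaps to test.
--     if s == s[::-1]:
--         return True
--     l = list(s)
--     n = len(l)
--     d = [k for k in range(n // 2) if l[k] != l[n - 1 - k]]
--     if len(d) > 2:
--         return False
--     cand = [x for k in d for x in (k, n - 1 - k)]
--     if n % 2 == 1:
--         cand.append(n // 2)
--     for i in cand:
--         for j in cand:
--             if i < j:
--                 t = l[:]
--                 t[i], t[j] = t[j], t[i]
--                 if t == t[::-1]:
--                     return True
--     return False
-- ===== Notes on version B (the rewrite author's own statement) =====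
-- stated objective: faster
-- what changed: Instead of trying all O(n^2) swaps with an O(n) palindrome test each, B collects the mismatched symmetric pairs in one pass; if there are more than two it answers False, otherwise it tests only the at most 10 swaps among those (at most 5) candidate positions (pairs' indices plus the middle).
import Mathlib
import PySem

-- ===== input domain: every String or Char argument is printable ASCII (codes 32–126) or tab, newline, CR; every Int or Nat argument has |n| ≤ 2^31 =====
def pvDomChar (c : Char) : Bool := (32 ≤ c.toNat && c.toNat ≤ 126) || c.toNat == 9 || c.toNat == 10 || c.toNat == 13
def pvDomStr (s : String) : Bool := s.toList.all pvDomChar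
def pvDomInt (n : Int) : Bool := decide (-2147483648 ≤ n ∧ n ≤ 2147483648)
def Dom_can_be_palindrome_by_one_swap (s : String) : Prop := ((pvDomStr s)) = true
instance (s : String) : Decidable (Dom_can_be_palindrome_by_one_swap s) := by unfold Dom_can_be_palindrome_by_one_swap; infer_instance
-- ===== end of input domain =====

-- B re-implements the O(n^3) brute-force swap search in O(n): collect the mismatched
-- symmetric pairs; only swaps among their positions (plus the middle) can help.

-- shared helper: the simultaneous assignment  t[i], t[j] = t[j], t[i]  of both Pythons
-- (exact: both indices used here are always in range, so getD never sees its default)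
def pvSwap (l : List Char) (i j : Nat) : List Char :=
  let a := l.getD i ' '
  let b := l.getD j ' '
  (l.set i b).set j a

-- ===== PORT A =====
-- literal port of A: check s == s[::-1]; else try every pair i < j, swap, test, swap back
-- (the Python restores the list before the next iteration, so each test sees the
-- original list with exactly one pair swapped, as written here)
def can_be_palindrome_by_one_swap (s : String) : Bool :=
  if s.toList = s.toList.reverse then true
  else
    (List.range s.toList.length).any fun i =>
      (List.range' (i+1) (s.toList.length - (i+1))).any fun j =>
        pvSwap s.toList i j == (pvSwap s.toList i j).reverse

-- ===== PORT B =====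
-- d = [k for k in range(n//2) if l[k] != l[n-1-k]]
def pvD (l : List Char) : List Nat :=
  (List.range (l.length / 2)).filter fun k =>
    l.getD k ' ' != l.getD (l.length - 1 - k) ' '

-- cand = [x for k in d for x in (k, n-1-k)] (+ middle when n is odd)
def pvCand (l : List Char) : List Nat :=
  ((pvD l).flatMap fun k => [k, l.length - 1 - k]) ++
    (if l.length % 2 = 1 then [l.length / 2] else [])

def can_be_palindrome_by_one_swap_alt (s : String) : Bool :=
  if s.toList = s.toList.reverse then true
  else if 2 < (pvD s.toList).length then false
  else
    (pvCand s.toList).any fun i =>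
      (pvCand s.toList).any fun j =>
        i < j && (pvSwap s.toList i j == (pvSwap s.toList i j).reverse)

-- ===== PRECONDITION & SPEC =====
def Spec_can_be_palindrome_by_one_swap (s : String) (out : Bool) : Prop := out = can_be_palindrome_by_one_swap_alt s
instance (s : String) (out : Bool) : Decidable (Spec_can_be_palindrome_by_one_swap s out) := by unfold Spec_can_be_palindrome_by_one_swap; infer_instance

-- ===== CLAIM (what is proved, stated in full; the proofs are below) =====
def Claim_equal_can_be_palindrome_by_one_swap : Prop := ∀ (s : String), Dom_can_be_palindrome_by_one_swap s → Spec_can_be_palindrome_by_one_swap s (can_be_palindrome_by_one_swap s)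

-- ===== LEMMAS AND PROOFS =====

theorem length_pvSwap (l : List Char) (i j : Nat) : (pvSwap l i j).length = l.length := by
  simp [pvSwap]

theorem getElem_pvSwap (l : List Char) (i j k : Nat) (hi : i < l.length) (hj : j < l.length)
    (hk : k < (pvSwap l i j).length) :
    (pvSwap l i j)[k] =
      if k = j then l[i] else if k = i then l[j]
      else l[k]'(by rw [length_pvSwap] at hk; exact hk) := by
  unfold pvSwap
  simp only [List.getElem_set, List.getD_eq_getElem l ' ' hi, List.getD_eq_getElem l ' ' hj]
  split_ifs <;> first | rfl | omega

theorem pvSwap_self (l : List Char) (i j : Nat) (hi : i < l.length) (hj : j < l.length)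
    (h : l[i] = l[j]) : pvSwap l i j = l := by
  apply List.ext_getElem (length_pvSwap l i j)
  intro k h1 h2
  rw [getElem_pvSwap l i j k hi hj h1]
  split_ifs with h3 h4
  · subst h3; exact h
  · subst h4; exact h.symm
  · rfl

theorem pal_iff (l : List Char) :
    l = l.reverse ↔ ∀ k, ∀ (hk : k < l.length), l[k] = l[l.length - 1 - k]'(by omega) := by
  constructor
  · intro h k hk
    calc l[k] = l.reverse[k]'(by simpa using hk) := List.getElem_of_eq h hk
    _ = l[l.length - 1 - k]'(by omega) := by rw [List.getElem_reverse]
  · intro h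
    apply List.ext_getElem (by simp)
    intro k h1 h2
    rw [List.getElem_reverse]
    exact h k h1

-- core: if l is not a palindrome but swapping i < j makes one, then every mismatched
-- pair touches {i, j}, and each of i, j sits in a mismatched pair or is the middle
theorem swap_pal_core (l : List Char) (i j : Nat) (hij : i < j) (hj : j < l.length)
    (hnp : ¬ l = l.reverse) (hp : pvSwap l i j = (pvSwap l i j).reverse) :
    (∀ k, ∀ (hk : k < l.length), l[k] ≠ l[l.length - 1 - k]'(by omega) →
        (k = i ∨ k = j ∨ l.length - 1 - k = i ∨ l.length - 1 - k = j))
    ∧ (l[i]'(by omega) ≠ l[l.length - 1 - i]'(by omega) ∨ (l.length % 2 = 1 ∧ i = l.length / 2))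
    ∧ (l[j]'hj ≠ l[l.length - 1 - j]'(by omega) ∨ (l.length % 2 = 1 ∧ j = l.length / 2)) := by
  have hi : i < l.length := lt_trans hij hj
  have hne : l[i]'hi ≠ l[j]'hj := by
    intro he
    exact hnp (by rw [pvSwap_self l i j hi hj he] at hp; exact hp)
  have hP : ∀ k, ∀ (hk : k < l.length),
      (if k = j then l[i] else if k = i then l[j] else l[k]) =
      (if l.length - 1 - k = j then l[i] else if l.length - 1 - k = i then l[j]
       else l[l.length - 1 - k]'(by omega)) := by
    intro k hk
    have h1 := (pal_iff _).mp hp k (by rw [length_pvSwap]; exact hk)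
    rw [getElem_pvSwap l i j k hi hj, getElem_pvSwap l i j _ hi hj] at h1
    · simpa [length_pvSwap] using h1
  refine ⟨?_, ?_, ?_⟩
  · intro k hk hmk
    by_contra hcon
    rw [not_or, not_or, not_or] at hcon
    obtain ⟨h1, h2, h3, h4⟩ := hcon
    have := hP k hk
    rw [if_neg h1, if_neg h2, if_neg h3, if_neg h4] at this
    exact hmk this
  · by_cases hmid : l.length - 1 - i = i
    · right; omega
    · left
      by_cases hji : l.length - 1 - i = j
      · exfalso
        have := hP i hi
        rw [if_neg (Nat.ne_of_lt hij), if_pos rfl, if_pos hji] at this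
        exact hne this.symm
      · intro heq
        have h5 := hP i hi
        rw [if_neg (Nat.ne_of_lt hij), if_pos rfl, if_neg hji, if_neg hmid] at h5
        exact hne (heq.trans h5.symm)
  · by_cases hmid : l.length - 1 - j = j
    · right; omega
    · left
      by_cases hji : l.length - 1 - j = i
      · exfalso
        have := hP j hj
        rw [if_pos rfl, if_neg hmid, if_pos hji] at this
        exact hne this
      · intro heq
        have h5 := hP j hj
        rw [if_pos rfl, if_neg hmid, if_neg hji] at h5
        exact hne (h5.trans heq.symm)

theorem mem_pvD (l : List Char) (k : Nat) :
    k ∈ pvD l ↔ k < l.length / 2 ∧ l.getD k ' ' ≠ l.getD (l.length - 1 - k) ' ' := by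
  simp [pvD, List.mem_filter, List.mem_range]

theorem pvD_length_le (l : List Char) (i j : Nat) (hij : i < j) (hj : j < l.length)
    (hnp : ¬ l = l.reverse) (hp : pvSwap l i j = (pvSwap l i j).reverse) :
    (pvD l).length ≤ 2 := by
  obtain ⟨loc, -, -⟩ := swap_pal_core l i j hij hj hnp hp
  have hsub : pvD l ⊆ [if i < l.length / 2 then i else l.length - 1 - i,
                       if j < l.length / 2 then j else l.length - 1 - j] := by
    intro k hk
    rw [mem_pvD] at hk
    obtain ⟨hk2, hmk⟩ := hk
    have hkn : k < l.length := by omega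
    have hmk' : l[k]'hkn ≠ l[l.length - 1 - k]'(by omega) := by
      rwa [List.getD_eq_getElem l ' ' hkn, List.getD_eq_getElem l ' ' (by omega : l.length - 1 - k < l.length)] at hmk
    have h := loc k hkn hmk'
    simp only [List.mem_cons, List.not_mem_nil, or_false]
    rcases h with h | h | h | h <;> split_ifs <;> omega
  have hnd : (pvD l).Nodup := List.Nodup.filter _ (List.nodup_range)
  simpa using (List.subperm_of_subset hnd hsub).length_le

theorem mem_pvCand_of_mismatch (l : List Char) (x : Nat) (hx : x < l.length)
    (h : l.getD x ' ' ≠ l.getD (l.length - 1 - x) ' ') : x ∈ pvCand l := by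
  have hxne : x ≠ l.length - 1 - x := by
    intro he
    exact h (by rw [← he])
  by_cases hxh : x < l.length / 2
  · exact List.mem_append_left _ (List.mem_flatMap.mpr ⟨x, (mem_pvD l x).mpr ⟨hxh, h⟩, List.mem_cons_self⟩)
  · have hlt : l.length - 1 - x < l.length / 2 := by omega
    have hk : (l.length - 1 - x) ∈ pvD l := by
      rw [mem_pvD]
      refine ⟨hlt, ?_⟩
      have he : l.length - 1 - (l.length - 1 - x) = x := by omega
      rw [he]
      exact fun hcontra => h hcontra.symm
    refine List.mem_append_left _ (List.mem_flatMap.mpr ⟨l.length - 1 - x, hk, ?_⟩)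
    simp only [List.mem_cons, List.not_mem_nil, or_false]
    omega

theorem mem_pvCand_mid (l : List Char) (h1 : l.length % 2 = 1) : l.length / 2 ∈ pvCand l :=
  List.mem_append_right _ (by rw [if_pos h1]; simp)

theorem mem_pvCand_lt (l : List Char) (hn : 0 < l.length) (x : Nat) (hx : x ∈ pvCand l) :
    x < l.length := by
  rcases List.mem_append.mp hx with h | h
  · obtain ⟨k, hk, hxk⟩ := List.mem_flatMap.mp h
    rw [mem_pvD] at hk
    simp only [List.mem_cons, List.not_mem_nil, or_false] at hxk
    omega
  · by_cases hm : l.length % 2 = 1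
    · rw [if_pos hm] at h
      simp only [List.mem_cons, List.not_mem_nil, or_false] at h
      omega
    · rw [if_neg hm] at h
      exact absurd h (List.not_mem_nil)

-- ===== VERDICT (by name: the statement is the Claim_ definition above) =====
theorem can_be_palindrome_by_one_swap_spec : Claim_equal_can_be_palindrome_by_one_swap := by
  intro s _
  unfold Spec_can_be_palindrome_by_one_swap
  unfold can_be_palindrome_by_one_swap can_be_palindrome_by_one_swap_alt
  set l := s.toList with hl
  by_cases hp : l = l.reverse
  · rw [if_pos hp, if_pos hp]
  · simp only [if_neg hp]
    have hn : 0 < l.length := by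
      rcases l with _ | ⟨c, t⟩
      · exact absurd rfl hp
      · simp
    by_cases h2 : 2 < (pvD l).length
    · rw [if_pos h2]
      cases hA : (List.range l.length).any fun i =>
          (List.range' (i+1) (l.length - (i+1))).any fun j =>
            pvSwap l i j == (pvSwap l i j).reverse
      · rfl
      · exfalso
        rw [List.any_eq_true] at hA
        obtain ⟨i, -, hA⟩ := hA
        rw [List.any_eq_true] at hA
        obtain ⟨j, hjm, hpal⟩ := hA
        rw [List.mem_range'_1] at hjm
        rw [beq_iff_eq] at hpal
        have := pvD_length_le l i j (by omega) (by omega) hp hpal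
        omega
    · rw [if_neg h2]
      have hiff :
          ((List.range l.length).any fun i =>
            (List.range' (i+1) (l.length - (i+1))).any fun j =>
              pvSwap l i j == (pvSwap l i j).reverse) = true ↔
          ((pvCand l).any fun i => (pvCand l).any fun j =>
              i < j && (pvSwap l i j == (pvSwap l i j).reverse)) = true := by
        constructor
        · intro hA
          rw [List.any_eq_true] at hA
          obtain ⟨i, him, hA⟩ := hA
          rw [List.any_eq_true] at hA
          obtain ⟨j, hjm, hpal⟩ := hA
          rw [List.mem_range] at him
          rw [List.mem_range'_1] at hjm
          rw [beq_iff_eq] at hpal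
          have hij : i < j := by omega
          have hjlt : j < l.length := by omega
          have hilt : i < l.length := by omega
          obtain ⟨-, hic, hjc⟩ := swap_pal_core l i j hij hjlt hp hpal
          have hmemi : i ∈ pvCand l := by
            rcases hic with h | ⟨ho, he⟩
            · refine mem_pvCand_of_mismatch l i hilt ?_
              rwa [List.getD_eq_getElem l ' ' hilt,
                List.getD_eq_getElem l ' ' (by omega : l.length - 1 - i < l.length)]
            · rw [he]; exact mem_pvCand_mid l ho
          have hmemj : j ∈ pvCand l := by
            rcases hjc with h | ⟨ho, he⟩
            · refine mem_pvCand_of_mismatch l j hjlt ?_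
              rwa [List.getD_eq_getElem l ' ' hjlt,
                List.getD_eq_getElem l ' ' (by omega : l.length - 1 - j < l.length)]
            · rw [he]; exact mem_pvCand_mid l ho
          rw [List.any_eq_true]
          refine ⟨i, hmemi, ?_⟩
          rw [List.any_eq_true]
          refine ⟨j, hmemj, ?_⟩
          rw [Bool.and_eq_true]
          exact ⟨decide_eq_true hij, beq_iff_eq.mpr hpal⟩
        · intro hB
          rw [List.any_eq_true] at hB
          obtain ⟨i, him, hB⟩ := hB
          rw [List.any_eq_true] at hB
          obtain ⟨j, hjm, hpal⟩ := hB
          rw [Bool.and_eq_true, decide_eq_true_eq] at hpal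
          obtain ⟨hij, hpal⟩ := hpal
          have hjlt : j < l.length := mem_pvCand_lt l hn j hjm
          have hilt : i < l.length := mem_pvCand_lt l hn i him
          rw [List.any_eq_true]
          refine ⟨i, List.mem_range.mpr hilt, ?_⟩
          rw [List.any_eq_true]
          exact ⟨j, List.mem_range'_1.mpr ⟨by omega, by omega⟩, hpal⟩
      exact Bool.eq_iff_iff.mpr hiff
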